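-- pv_equiv track=rewrite | github.com/wearypossum4770/dark-coding-challenges | easy/backspace_compare.py | process_backspace_compare
-- ===== SOURCE A (Python) =====
-- def process_backspace_compare(text: str) -> str:
--     result = []
--     for c in text:
--         if c == "#":
--             if len(result) != 0:
--                 result.pop(-1)
--         else:
--             result.append(c)
--     return "".join(result)
-- ===== SOURCE B (Python) =====
-- def process_backspace_compare(text: str) -> str:
--     skip = 0
--     out = []
--     for c in reversed(text):
--         if c == "#":
--             skip += 1
--         elif skip:
--             skip -= 1
--         else:
--             out.append(c)
--     return "".join(reversed(out))
-- ===== Notes on version B (the rewrite author's own statement) =====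
-- stated objective: alternative
-- what changed: Replaced the forward mutable-stack pass (append/pop) with a single right-to-left scan that counts pending backspaces in an integer skip counter and collects surviving characters, reversing them at the end.
import Mathlib
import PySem

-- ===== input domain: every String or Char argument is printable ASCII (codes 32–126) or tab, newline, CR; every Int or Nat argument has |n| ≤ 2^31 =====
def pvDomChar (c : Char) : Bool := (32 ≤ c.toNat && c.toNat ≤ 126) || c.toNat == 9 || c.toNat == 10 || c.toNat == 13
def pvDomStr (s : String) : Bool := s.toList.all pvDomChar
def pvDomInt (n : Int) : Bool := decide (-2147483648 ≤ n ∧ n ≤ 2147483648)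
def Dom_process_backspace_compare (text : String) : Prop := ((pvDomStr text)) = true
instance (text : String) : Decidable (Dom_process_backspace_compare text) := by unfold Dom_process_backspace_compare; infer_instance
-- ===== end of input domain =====

-- B replaces A's forward append/pop stack by a right-to-left scan with a skip counter (objective: alternative, same cost).

-- ===== PORT A =====
-- one loop step of A: '#' pops the last element when the stack is nonempty, else the char is appended
def pbcStepA (acc : List Char) (c : Char) : List Char :=
  if c = '#' then (if acc.length ≠ 0 then acc.dropLast else acc) else acc ++ [c]

def process_backspace_compare (text : String) : String :=
  String.ofList (text.toList.foldl pbcStepA [])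

-- ===== PORT B =====
-- one loop step of B over the reversed text: state = (skip counter, collected chars)
def pbcStepB (st : Nat × List Char) (c : Char) : Nat × List Char :=
  if c = '#' then (st.1 + 1, st.2)
  else if st.1 ≠ 0 then (st.1 - 1, st.2)
  else (st.1, st.2 ++ [c])

def process_backspace_compare_alt (text : String) : String :=
  String.ofList ((text.toList.reverse.foldl pbcStepB (0, [])).2.reverse)

-- ===== PRECONDITION & SPEC =====
def Spec_process_backspace_compare (text : String) (out : String) : Prop := out = process_backspace_compare_alt text
instance (text : String) (out : String) : Decidable (Spec_process_backspace_compare text out) := by unfold Spec_process_backspace_compare; infer_instance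

-- ===== CLAIM (what is proved, stated in full; the proofs are below) =====
def Claim_equal_process_backspace_compare : Prop := ∀ (text : String), Dom_process_backspace_compare text → Spec_process_backspace_compare text (process_backspace_compare text)

-- ===== LEMMAS AND PROOFS =====

-- the kept characters of B's scan, in scan (right-to-left) order, given skip counter k
def pbcKept : List Char → Nat → List Char
  | [], _ => []
  | c :: r, k =>
    if c = '#' then pbcKept r (k + 1)
    else if k ≠ 0 then pbcKept r (k - 1)
    else c :: pbcKept r k

theorem pbcB_snd (r : List Char) : ∀ (k : Nat) (out : List Char),
    (r.foldl pbcStepB (k, out)).2 = out ++ pbcKept r k := by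
  induction r with
  | nil => intro k out; simp [pbcKept]
  | cons c r ih =>
    intro k out
    simp only [List.foldl_cons, pbcStepB, pbcKept]
    split_ifs <;> simp [ih]

theorem pbcStepA_hash (s : List Char) : pbcStepA s '#' = s.dropLast := by
  cases s <;> simp [pbcStepA]

-- main invariant: scanning r with skip k keeps exactly A's stack over r.reverse minus its last k elements
theorem pbcKept_eq (r : List Char) : ∀ (k : Nat),
    (pbcKept r k).reverse =
      (r.reverse.foldl pbcStepA []).take ((r.reverse.foldl pbcStepA []).length - k) := by
  induction r with
  | nil => intro k; simp [pbcKept]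
  | cons c r ih =>
    intro k
    simp only [List.reverse_cons, List.foldl_append, List.foldl_cons, List.foldl_nil]
    set s : List Char := r.reverse.foldl pbcStepA [] with hs
    by_cases hc : c = '#'
    · subst hc
      rw [pbcKept, if_pos rfl, ih (k + 1), pbcStepA_hash, List.dropLast_eq_take,
        List.length_take, List.take_take]
      congr 1
      omega
    · have hA : pbcStepA s c = s ++ [c] := by simp [pbcStepA, hc]
      rcases Nat.eq_zero_or_pos k with hk | hk
      · subst hk
        rw [pbcKept, if_neg hc, if_neg (by simp)]
        simp [ih 0, hA]
      · have hk' : k ≠ 0 := Nat.pos_iff_ne_zero.mp hk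
        rw [pbcKept, if_neg hc, if_pos hk', ih (k - 1), hA]
        rw [List.take_append_of_le_length (by simp; omega)]
        congr 1
        simp
        omega

-- ===== VERDICT (by name: the statement is the Claim_ definition above) =====
theorem process_backspace_compare_spec : Claim_equal_process_backspace_compare := by
  intro text _
  unfold Spec_process_backspace_compare process_backspace_compare process_backspace_compare_alt
  rw [pbcB_snd, List.nil_append, pbcKept_eq, List.reverse_reverse, Nat.sub_zero, List.take_length]
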